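-- pv_equiv track=rewrite | github.com/xenix1337/acmlib | pdf/kactl-include/preprocessor.py | ordoescape
-- ===== SOURCE A (Python) =====
-- def ordoescape(input):
--     start = input.find("O(")
--     if start >= 0:
--         bracketcount = 1
--         end = start+1
--         while end+1<len(input) and bracketcount>0:
--             end = end + 1
--             if input[end] == '(':
--                 bracketcount = bracketcount + 1
--             elif input[end] == ')':
--                 bracketcount = bracketcount - 1
--         if bracketcount == 0:
--             return r"%s\bigo{%s}%s" % (input[:start], input[start+2:end], ordoescape(input[end+1:]))
--     return input
-- ===== SOURCE B (Python) =====
-- def ordoescape(input):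
--     # One left-to-right pass: a state machine with a depth counter and a content buffer.
--     out = []
--     buf = []
--     depth = 0
--     i = 0
--     n = len(input)
--     while i < n:
--         c = input[i]
--         if depth == 0:
--             if c == 'O' and i + 1 < n and input[i + 1] == '(':
--                 depth = 1
--                 buf = []
--                 i += 2
--                 continue
--             out.append(c)
--         elif c == '(':
--             depth += 1
--             buf.append(c)
--         elif c == ')':
--             depth -= 1
--             if depth == 0:
--                 out.append('\\bigo{' + ''.join(buf) + '}')
--             else:
--                 buf.append(c)
--         else:
--             buf.append(c)
--         i += 1
--     if depth > 0:
--         out.append('O(' + ''.join(buf))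
--     return ''.join(out)
-- ===== Notes on version B (the rewrite author's own statement) =====
-- stated objective: alternative
-- what changed: Replaces A's substring search plus inner balanced-parenthesis scan plus tail recursion on the remaining suffix by a single left-to-right character state machine (depth counter and content buffer) that builds the output in one pass.
import Mathlib
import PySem

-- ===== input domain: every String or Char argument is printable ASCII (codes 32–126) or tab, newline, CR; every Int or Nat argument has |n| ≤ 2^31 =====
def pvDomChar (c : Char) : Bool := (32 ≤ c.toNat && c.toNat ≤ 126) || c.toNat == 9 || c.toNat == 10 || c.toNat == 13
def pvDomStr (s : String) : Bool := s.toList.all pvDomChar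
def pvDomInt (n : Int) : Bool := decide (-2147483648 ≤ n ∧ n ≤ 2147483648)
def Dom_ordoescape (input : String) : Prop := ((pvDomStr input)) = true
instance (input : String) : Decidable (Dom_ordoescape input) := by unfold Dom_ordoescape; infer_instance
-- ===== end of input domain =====

-- B replaces A's find("O(") + inner balanced scan + recursion on the suffix by a
-- single left-to-right character state machine (depth counter + content buffer); same output.

-- ===== PORT A =====
-- A's inner while-loop: 'while end+1 < len(input) and bracketcount > 0: …'
def pvScan (l : List Char) (e : Nat) (bc : Int) : Nat × Int :=
  if e + 1 < l.length ∧ bc > 0 then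
    pvScan l (e + 1)
      (if l.getD (e + 1) ' ' = '(' then bc + 1
       else if l.getD (e + 1) ' ' = ')' then bc - 1 else bc)
  else (e, bc)
termination_by l.length - e

-- A on List Char: find "O(", balanced scan, %-format, recurse on the suffix
def ordoescapeL (l : List Char) : List Char :=
  let start := PySem.Chars.find l ['O', '(']
  if h : 0 ≤ start then
    let p := pvScan l (start.toNat + 1) 1
    if p.2 = 0 then
      l.take start.toNat ++ ['\\', 'b', 'i', 'g', 'o', '{']
        ++ (l.drop (start.toNat + 2)).take (p.1 - (start.toNat + 2)) ++ ['}']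
        ++ ordoescapeL (l.drop (p.1 + 1))
    else l
  else l
termination_by l.length
decreasing_by
  have hinf : ['O', '('] <:+: l := (PySem.Chars.find_nonneg_iff l ['O', '(']).mp h
  have h2 : 2 ≤ l.length := by simpa using hinf.length_le
  simp only [List.length_drop]; omega

def ordoescape (input : String) : String := String.ofList (ordoescapeL input.toList)

-- ===== PORT B =====
-- B's while-loop as recursion over the remaining characters:
-- state = current depth (0 = outside an O(...)), content buffer, output accumulator
def pvBGo (l : List Char) (depth : Int) (buf : List Char) (out : List Char) : List Char :=
  match l with
  | [] => if depth > 0 then out ++ ['O', '('] ++ buf else out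
  | c :: cs =>
    if depth = 0 then
      if c = 'O' ∧ cs.headD ' ' = '(' then
        pvBGo cs.tail 1 [] out
      else
        pvBGo cs 0 buf (out ++ [c])
    else if c = '(' then pvBGo cs (depth + 1) (buf ++ [c]) out
    else if c = ')' then
      if depth = 1 then pvBGo cs 0 [] (out ++ ['\\', 'b', 'i', 'g', 'o', '{'] ++ buf ++ ['}'])
      else pvBGo cs (depth - 1) (buf ++ [c]) out
    else pvBGo cs depth (buf ++ [c]) out
termination_by l.length
decreasing_by
  · simp only [List.length_tail]; cases cs <;> simp_all
  all_goals simp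

def ordoescape_alt (input : String) : String := String.ofList (pvBGo input.toList 0 [] [])

-- ===== PRECONDITION & SPEC =====
def Spec_ordoescape (input : String) (out : String) : Prop := out = ordoescape_alt input
instance (input : String) (out : String) : Decidable (Spec_ordoescape input out) := by unfold Spec_ordoescape; infer_instance

-- ===== CLAIM (what is proved, stated in full; the proofs are below) =====
def Claim_equal_ordoescape : Prop := ∀ (input : String), Dom_ordoescape input → Spec_ordoescape input (ordoescape input)

-- ===== LEMMAS AND PROOFS =====

-- Proof-side scanner: consume chars, tracking depth, until the matching ')'; (content, rest)
def pvT : List Char → Int → Option (List Char × List Char)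
  | [], _ => none
  | c :: cs, d =>
    if c = ')' then
      if d = 1 then some ([], cs)
      else (pvT cs (d - 1)).map (fun p => (')' :: p.1, p.2))
    else if c = '(' then (pvT cs (d + 1)).map (fun p => ('(' :: p.1, p.2))
    else (pvT cs d).map (fun p => (c :: p.1, p.2))

theorem pvT_some_shape : ∀ (m : List Char) (d : Int) (content rest : List Char),
    pvT m d = some (content, rest) → m = content ++ ')' :: rest := by
  intro m
  induction m with
  | nil => intro d c r h; simp [pvT] at h
  | cons a as ih =>
      intro d c r h
      simp only [pvT] at h
      split_ifs at h with h1 h2 h3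
      · simp at h; obtain ⟨hc, hr⟩ := h; subst hc hr h1; rfl
      · simp only [Option.map_eq_some_iff] at h
        obtain ⟨⟨c', r'⟩, hT, he⟩ := h
        simp at he; obtain ⟨hc, hr⟩ := he
        subst h1; rw [← hc, ← hr]; simpa using ih _ _ _ hT
      · simp only [Option.map_eq_some_iff] at h
        obtain ⟨⟨c', r'⟩, hT, he⟩ := h
        simp at he; obtain ⟨hc, hr⟩ := he
        subst h3; rw [← hc, ← hr]; simpa using ih _ _ _ hT
      · simp only [Option.map_eq_some_iff] at h
        obtain ⟨⟨c', r'⟩, hT, he⟩ := h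
        simp at he; obtain ⟨hc, hr⟩ := he
        rw [← hc, ← hr]; simpa using ih _ _ _ hT

-- Proof-side recursive description that both ports are shown to satisfy
def pvS : List Char → List Char
  | [] => []
  | c :: cs =>
    if c = 'O' ∧ cs.headD ' ' = '(' then
      match hT : pvT cs.tail 1 with
      | some (content, rest) => ['\\', 'b', 'i', 'g', 'o', '{'] ++ content ++ ['}'] ++ pvS rest
      | none => c :: cs
    else c :: pvS cs
termination_by l => l.length
decreasing_by
  · have hsh := pvT_some_shape _ _ _ _ hT
    have hlen : cs.tail.length = content.length + 1 + rest.length := by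
      rw [hsh]; simp; omega
    have h3 : cs.tail.length ≤ cs.length := by simp [List.length_tail]
    simp; omega
  · simp

theorem pvScan_stop (l : List Char) (e : Nat) (bc : Int) (h : ¬(e + 1 < l.length ∧ bc > 0)) :
    pvScan l e bc = (e, bc) := by
  rw [pvScan, if_neg h]

theorem pvScan_spec (l : List Char) (e : Nat) (bc : Int) : 0 < bc →
    (match pvT (l.drop (e + 1)) bc with
     | some (content, _) => pvScan l e bc = (e + 1 + content.length, 0)
     | none => (pvScan l e bc).2 ≠ 0) := by
  fun_induction pvScan l e bc with
  | case1 e bc hcond ih =>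
      intro hbc
      obtain ⟨hlt, -⟩ := hcond
      have hget : l.getD (e + 1) ' ' = l[e + 1] := List.getD_eq_getElem l ' ' hlt
      have hdrop : l.drop (e + 1) = l[e + 1] :: l.drop (e + 1 + 1) :=
        List.drop_eq_getElem_cons hlt
      rw [hdrop, pvT]
      rw [hget] at ih ⊢
      by_cases h1 : l[e + 1] = ')'
      · simp only [h1, Char.reduceEq, reduceIte, reduceDIte] at ih ⊢
        by_cases h2 : bc = 1
        · subst h2
          simp only [reduceIte]
          rw [pvScan_stop l (e + 1) (1 - 1) (by norm_num)]
          simp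
        · rw [if_neg h2]
          have ih' := ih (by omega)
          cases hT : pvT (l.drop (e + 1 + 1)) (bc - 1) with
          | none => rw [hT] at ih'; simpa using ih'
          | some p =>
              rw [hT] at ih'
              simp only [Option.map_some]
              simp only at ih' ⊢
              rw [ih']
              simp; omega
      · by_cases h3 : l[e + 1] = '('
        · simp only [h3, Char.reduceEq, reduceIte, reduceDIte] at ih ⊢
          have ih' := ih (by omega)
          cases hT : pvT (l.drop (e + 1 + 1)) (bc + 1) with
          | none => rw [hT] at ih'; simpa using ih'
          | some p =>
              rw [hT] at ih'
              simp only [Option.map_some]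
              simp only at ih' ⊢
              rw [ih']
              simp; omega
        · simp only [if_neg h1, if_neg h3, dif_neg h1, dif_neg h3] at ih ⊢
          have ih' := ih hbc
          cases hT : pvT (l.drop (e + 1 + 1)) bc with
          | none => rw [hT] at ih'; simpa using ih'
          | some p =>
              rw [hT] at ih'
              simp only [Option.map_some]
              simp only at ih' ⊢
              rw [ih']
              simp; omega
  | case2 e bc hcond =>
      intro hbc
      have hge : l.length ≤ e + 1 := by
        by_contra h
        exact hcond ⟨by omega, hbc⟩
      rw [List.drop_eq_nil_of_le hge, pvT]
      simp; omega

theorem findOP_eq_zero (l : List Char) (h : ['O','('] <+: l) :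
    PySem.Chars.find l ['O','('] = 0 := by
  have hnn : 0 ≤ PySem.Chars.find l ['O','('] :=
    (PySem.Chars.find_nonneg_iff l ['O','(']).mpr h.isInfix
  obtain ⟨h1, h2⟩ := PySem.Chars.find_spec (s := l) (sub := ['O','(']) hnn
  by_contra hne
  have hpos : 0 < (PySem.Chars.find l ['O','(']).toNat := by omega
  exact h2 0 hpos (by simpa using h)

theorem findOP_cons (c : Char) (cs : List Char) (h : ¬ ['O','('] <+: (c :: cs)) :
    PySem.Chars.find (c :: cs) ['O','('] =
      if 0 ≤ PySem.Chars.find cs ['O','('] then PySem.Chars.find cs ['O','('] + 1 else -1 := by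
  by_cases hin : ['O','('] <:+: cs
  · have hs : 0 ≤ PySem.Chars.find cs ['O','('] := (PySem.Chars.find_nonneg_iff _ _).mpr hin
    rw [if_pos hs]
    have hin2 : ['O','('] <:+: (c :: cs) := hin.trans (List.suffix_cons c cs).isInfix
    have ht : 0 ≤ PySem.Chars.find (c :: cs) ['O','('] := (PySem.Chars.find_nonneg_iff _ _).mpr hin2
    obtain ⟨ha1, ha2⟩ := PySem.Chars.find_spec (s := c :: cs) (sub := ['O','(']) ht
    obtain ⟨hb1, hb2⟩ := PySem.Chars.find_spec (s := cs) (sub := ['O','(']) hs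
    obtain ⟨t, htv⟩ : ∃ t : ℕ, PySem.Chars.find (c :: cs) ['O','('] = (t : Int) :=
      ⟨_, (Int.toNat_of_nonneg ht).symm⟩
    obtain ⟨s, hsv⟩ : ∃ s : ℕ, PySem.Chars.find cs ['O','('] = (s : Int) :=
      ⟨_, (Int.toNat_of_nonneg hs).symm⟩
    rw [htv] at ha1 ha2
    rw [hsv] at hb1 hb2
    simp only [Int.toNat_natCast] at ha1 ha2 hb1 hb2
    have ht0 : t ≠ 0 := by
      intro h0
      rw [h0] at ha1
      exact h (by simpa using ha1)
    have hle : t ≤ s + 1 := by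
      by_contra hgt
      exact ha2 (s + 1) (by omega) (by simpa using hb1)
    have hge : s + 1 ≤ t := by
      have hnlt : ¬ (t - 1) < s := by
        intro hlt
        refine hb2 (t - 1) hlt ?_
        have hdk : cs.drop (t - 1) = (c :: cs).drop t := by
          cases t with
          | zero => omega
          | succ n => simp
        rw [hdk]; exact ha1
      omega
    rw [htv, hsv]
    omega
  · have h2 : ¬ ['O','('] <:+: (c :: cs) := by
      rw [List.infix_cons_iff]
      rintro (hp | hi)
      · exact h hp
      · exact hin hi
    rw [(PySem.Chars.find_eq_neg_one_iff _ _).mpr h2,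
        (PySem.Chars.find_eq_neg_one_iff _ _).mpr hin]
    norm_num

-- closed form of A's one step, at a known find position
theorem A_closed (l : List Char) (s : Nat)
    (hf : PySem.Chars.find l ['O','('] = (s : Int)) :
    ordoescapeL l =
      (match pvT (l.drop (s + 2)) 1 with
       | some (content, _) =>
           l.take s ++ ['\\', 'b', 'i', 'g', 'o', '{'] ++ content ++ ['}']
             ++ ordoescapeL (l.drop (s + 3 + content.length))
       | none => l) := by
  rw [ordoescapeL]
  simp only [hf]
  rw [dif_pos (by positivity : (0:Int) ≤ (s:Int))]
  simp only [Int.toNat_natCast]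
  have hspec := pvScan_spec l (s + 1) 1 (by norm_num)
  have hdd : s + 1 + 1 = s + 2 := by omega
  rw [hdd] at hspec
  cases hT : pvT (l.drop (s + 2)) 1 with
  | none =>
      rw [hT] at hspec
      simp only at hspec
      rw [if_neg hspec]
  | some p =>
      rw [hT] at hspec
      simp only at hspec
      rw [hspec]
      obtain ⟨content, rest⟩ := p
      have hsh := pvT_some_shape _ _ _ _ hT
      have htake : (l.drop (s + 2)).take (s + 1 + 1 + content.length - (s + 2)) = content := by
        have : s + 1 + 1 + content.length - (s + 2) = content.length := by omega
        rw [this, hsh]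
        simp
      rw [htake]
      have hidx : s + 1 + 1 + content.length + 1 = s + 3 + content.length := by omega
      rw [hidx]
      simp

theorem A_neg (l : List Char) (hf : PySem.Chars.find l ['O','('] = -1) :
    ordoescapeL l = l := by
  rw [ordoescapeL]
  simp [hf]

theorem pvS_cons_not (c : Char) (cs : List Char) (h : ¬ ['O','('] <+: (c :: cs)) :
    pvS (c :: cs) = c :: pvS cs := by
  rw [pvS]
  rw [if_neg]
  rintro ⟨h1, h2⟩
  subst h1
  apply h
  cases cs with
  | nil => simp at h2
  | cons d ds =>
      simp at h2
      subst h2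
      exact ⟨ds, rfl⟩

theorem pvS_OP (t : List Char) :
    pvS ('O' :: '(' :: t) =
      (match pvT t 1 with
       | some (content, rest) => ['\\', 'b', 'i', 'g', 'o', '{'] ++ content ++ ['}'] ++ pvS rest
       | none => 'O' :: '(' :: t) := by
  rw [pvS, if_pos (by simp)]
  split
  · rename_i content rest heq
    simp only [List.tail_cons] at heq
    rw [heq]
  · rename_i heq
    simp only [List.tail_cons] at heq
    rw [heq]

theorem A_eq_S : ∀ (l : List Char), ordoescapeL l = pvS l := by
  have key : ∀ (n : Nat) (l : List Char), l.length ≤ n → ordoescapeL l = pvS l := by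
    intro n
    induction n with
    | zero =>
        intro l hl
        have hnil : l = [] := List.eq_nil_of_length_eq_zero (by omega)
        subst hnil
        rw [A_neg [] ((PySem.Chars.find_eq_neg_one_iff _ _).mpr (by simp)), pvS]
    | succ n ih =>
        intro l hl
        match l with
        | [] => rw [A_neg [] ((PySem.Chars.find_eq_neg_one_iff _ _).mpr (by simp)), pvS]
        | c :: cs =>
          by_cases hp : ['O','('] <+: (c :: cs)
          · obtain ⟨t, ht⟩ := hp
            have hc : c = 'O' := ((by simpa using congrArg (fun x => x.headD ' ') ht : 'O' = c)).symm
            have hcs : cs = '(' :: t := ((by simpa [hc] using congrArg List.tail ht : '(' :: t = cs)).symm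
            subst hc; subst hcs
            have hf0 : PySem.Chars.find ('O' :: '(' :: t) ['O','('] = ((0 : Nat) : Int) := by
              simpa using findOP_eq_zero _ ⟨t, rfl⟩
            rw [A_closed _ 0 hf0, pvS_OP]
            have hdrop2 : ('O' :: '(' :: t).drop (0 + 2) = t := by simp
            rw [hdrop2]
            cases hT : pvT t 1 with
            | none => rfl
            | some p =>
                obtain ⟨content, rest⟩ := p
                simp only
                have hsh := pvT_some_shape _ _ _ _ hT
                have hdrop3 : ('O' :: '(' :: t).drop (0 + 3 + content.length) = rest := by
                  have harith : (0 + 3 + content.length) = (content.length + 1) + 2 := by omega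
                  rw [harith]
                  simp only [List.drop_succ_cons]
                  rw [hsh]
                  have : content.length + 1 = content.length + 1 := rfl
                  simp [List.drop_append]
                rw [hdrop3]
                have hlen : rest.length ≤ n := by
                  have h1 : ('O' :: '(' :: t).length ≤ n + 1 := hl
                  have h2 : t.length = content.length + 1 + rest.length := by
                    rw [hsh]; simp; omega
                  simp at h1
                  omega
                rw [ih rest hlen]
                simp
          · rw [pvS_cons_not c cs hp, ← ih cs (by simp at hl; omega)]
            by_cases hfc : 0 ≤ PySem.Chars.find cs ['O','(']
            · obtain ⟨s, hsv⟩ : ∃ s : ℕ, PySem.Chars.find cs ['O','('] = (s : Int) :=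
                ⟨_, (Int.toNat_of_nonneg hfc).symm⟩
              have hfl : PySem.Chars.find (c :: cs) ['O','('] = ((s + 1 : ℕ) : Int) := by
                rw [findOP_cons c cs hp, if_pos hfc, hsv]
                push_cast; ring
              rw [A_closed (c :: cs) (s + 1) hfl, A_closed cs s hsv]
              have hdropc : (c :: cs).drop (s + 1 + 2) = cs.drop (s + 2) := by
                have : s + 1 + 2 = (s + 2) + 1 := by omega
                rw [this, List.drop_succ_cons]
              rw [hdropc]
              cases hT : pvT (cs.drop (s + 2)) 1 with
              | none => rfl
              | some p =>
                  simp only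
                  have h1 : (c :: cs).take (s + 1) = c :: cs.take s := List.take_succ_cons
                  have h2 : (c :: cs).drop (s + 1 + 3 + p.1.length) = cs.drop (s + 3 + p.1.length) := by
                    have : s + 1 + 3 + p.1.length = (s + 3 + p.1.length) + 1 := by omega
                    rw [this, List.drop_succ_cons]
                  rw [h1, h2]
                  simp
            · have hm1 : PySem.Chars.find cs ['O','('] = -1 := by
                have hge := PySem.Chars.neg_one_le_find cs ['O','(']
                omega
              have hfl : PySem.Chars.find (c :: cs) ['O','('] = -1 := by
                rw [findOP_cons c cs hp, if_neg hfc]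
              rw [A_neg _ hfl, A_neg _ hm1]
  intro l
  exact key l.length l le_rfl

theorem pvS_nil : pvS [] = [] := by rw [pvS]

theorem B_eq_S : ∀ (l : List Char) (d : Int) (buf out : List Char), 0 ≤ d →
    pvBGo l d buf out =
      if d = 0 then out ++ pvS l
      else match pvT l d with
        | some (content, rest) =>
            out ++ ['\\', 'b', 'i', 'g', 'o', '{'] ++ buf ++ content ++ ['}'] ++ pvS rest
        | none => out ++ ['O', '('] ++ buf ++ l := by
  intro l d buf out
  fun_induction pvBGo l d buf out with
  | case1 depth buf out hpos =>
      intro hd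
      rw [if_neg (by omega)]
      simp [pvT]
  | case2 depth buf out hpos =>
      intro hd
      rw [if_pos (by omega), pvS_nil]
      simp
  | case3 buf out c cs hm ih =>
      intro _
      obtain ⟨hc, hh⟩ := hm
      subst hc
      cases cs with
      | nil => simp at hh
      | cons e es =>
          simp at hh
          subst hh
          rw [if_pos rfl, pvS_OP]
          simp only [List.tail_cons] at ih ⊢
          rw [ih (by norm_num), if_neg (by norm_num)]
          cases hT : pvT es 1 with
          | none => simp
          | some p => simp
  | case4 buf out c cs hm ih =>
      intro _
      have hnp : ¬ ['O','('] <+: (c :: cs) := by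
        rintro ⟨t, ht⟩
        have hc : c = 'O' := ((by simpa using congrArg (fun x => x.headD ' ') ht : 'O' = c)).symm
        have hcs : cs = '(' :: t := ((by simpa [hc] using congrArg List.tail ht : '(' :: t = cs)).symm
        exact hm ⟨hc, by rw [hcs]; simp⟩
      rw [if_pos rfl, pvS_cons_not _ _ hnp, ih le_rfl, if_pos rfl]
      simp
  | case5 depth buf out cs hd0 ih =>
      intro hd
      rw [ih (by omega), if_neg (by omega), if_neg hd0]
      have hpvt : pvT ('(' :: cs) depth = (pvT cs (depth + 1)).map (fun p => ('(' :: p.1, p.2)) := by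
        simp [pvT]
      rw [hpvt]
      cases hT : pvT cs (depth + 1) with
      | none => simp
      | some p => simp
  | case6 buf out cs h1 h2 ih =>
      intro _
      rw [ih le_rfl, if_pos rfl, if_neg (by norm_num)]
      have hpvt : pvT (')' :: cs) 1 = some ([], cs) := by simp [pvT]
      rw [hpvt]
      simp
  | case7 depth buf out cs hd0 hd1 h2 ih =>
      intro hd
      rw [ih (by omega), if_neg (by omega), if_neg hd0]
      have hpvt : pvT (')' :: cs) depth = (pvT cs (depth - 1)).map (fun p => (')' :: p.1, p.2)) := by
        simp [pvT, hd1]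
      rw [hpvt]
      cases hT : pvT cs (depth - 1) with
      | none => simp
      | some p => simp
  | case8 depth buf out c cs hd0 hco hcc ih =>
      intro hd
      rw [ih hd, if_neg hd0, if_neg hd0]
      have hpvt : pvT (c :: cs) depth = (pvT cs depth).map (fun p => (c :: p.1, p.2)) := by
        simp [pvT, hco, hcc]
      rw [hpvt]
      cases hT : pvT cs depth with
      | none => simp
      | some p => simp

-- ===== VERDICT (by name: the statement is the Claim_ definition above) =====
theorem ordoescape_spec : Claim_equal_ordoescape := by
  intro input _
  unfold Spec_ordoescape ordoescape ordoescape_alt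
  rw [B_eq_S _ 0 [] [] le_rfl, if_pos rfl, List.nil_append, A_eq_S]
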